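-- pv_equiv track=rewrite | github.com/ahricool/charm-practise | code/interview/interview7.py | toRead
-- ===== SOURCE A (Python) =====
-- m = {
--     "1": "Yi",
--     "2": "Er",
--     "3": "San",
--     "4": "Si",
--     "5": "Wu",
--     "6": "Liu",
--     "7": "Qi",
--     "8": "Ba",
--     "9": "Jiu",
--     "0": "Ling",
-- }
--
-- def toRead(num):
--     # len(num)==4
--     # 4003
--     s = ""
--     unit = ["Qian", "Bai", "Shi", ""]
--     for idx in range(len(num)):
--         if num[idx] == "0" and s[-4:len(s)]== "Ling":
--             continue
--         if num[idx] == "0":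
--             s += "Ling"
--         else:
--             s += m[num[idx]] + unit[idx]
--
--     p = s[-4:len(s)]
--     # 10000000
--     if p == "Ling":
--         return s[0:-4]
--     else:
--         return s
-- ===== SOURCE B (Python) =====
-- m = {
--     "1": "Yi",
--     "2": "Er",
--     "3": "San",
--     "4": "Si",
--     "5": "Wu",
--     "6": "Liu",
--     "7": "Qi",
--     "8": "Ba",
--     "9": "Jiu",
--     "0": "Ling",
-- }
--
-- def toRead(num):
--     unit = ["Qian", "Bai", "Shi", ""]
--     # gap analysis: work only with the positions of the NONZERO digits; a "Ling"
--     # is emitted exactly when there is a gap (a zero run) before a nonzero digit.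
--     nz = [i for i, c in enumerate(num) if c != "0"]
--     parts = []
--     prev = -1
--     for i in nz:
--         if prev + 1 < i:
--             parts.append("Ling")
--         parts.append(m[num[i]] + unit[i])
--         prev = i
--     return "".join(parts)
-- ===== Notes on version B (the rewrite author's own statement) =====
-- stated objective: alternative
-- what changed: B abandons A's left-to-right digit pass with suppression of repeated 'Ling' and a trailing 4-char slice trim; instead it extracts the positions of the nonzero digits and does gap analysis over that position list, emitting one 'Ling' exactly where a zero run precedes a nonzero digit, so no collapsing or trailing trim ever happens.
import Mathlib
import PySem

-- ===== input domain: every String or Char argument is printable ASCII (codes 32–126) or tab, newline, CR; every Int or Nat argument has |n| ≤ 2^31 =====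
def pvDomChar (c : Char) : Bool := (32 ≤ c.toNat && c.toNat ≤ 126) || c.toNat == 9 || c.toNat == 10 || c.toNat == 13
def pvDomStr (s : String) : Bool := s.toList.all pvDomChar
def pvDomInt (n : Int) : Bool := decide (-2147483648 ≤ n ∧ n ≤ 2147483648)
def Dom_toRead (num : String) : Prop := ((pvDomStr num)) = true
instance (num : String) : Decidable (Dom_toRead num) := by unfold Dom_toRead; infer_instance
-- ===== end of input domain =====

-- B replaces A's suppressing/trimming digit pass by gap analysis over the list of nonzero-digit positions; objective: alternative algorithm (same cost).


-- ===== PORT A =====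
-- the module-level dict m (digit character -> pinyin), shared by both Pythons
def pvM : PySem.Dict Char (List Char) :=
  ⟨[('1', "Yi".toList), ('2', "Er".toList), ('3', "San".toList), ('4', "Si".toList),
    ('5', "Wu".toList), ('6', "Liu".toList), ('7', "Qi".toList), ('8', "Ba".toList),
    ('9', "Jiu".toList), ('0', "Ling".toList)]⟩

-- unit = ["Qian", "Bai", "Shi", ""]
def pvUnit : List (List Char) := ["Qian".toList, "Bai".toList, "Shi".toList, []]

-- Dict.getD / pyGetD are the total forms of m[...] / unit[idx]; Pre_toRead excludes
-- exactly the inputs where the Python raises (KeyError / IndexError) there.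
def toRead (num : String) : String :=
  let cs := num.toList
  let s := (PySem.List.pyRange 0 (cs.length : Int) 1).foldl
    (fun s idx =>
      let c := PySem.List.pyGetD cs idx ' '
      if c = '0' ∧ PySem.List.slice s (some (-4)) (some (s.length : Int)) = "Ling".toList then s
      else if c = '0' then s ++ "Ling".toList
      else s ++ (PySem.Dict.getD pvM c [] ++ PySem.List.pyGetD pvUnit idx [])) []
  let p := PySem.List.slice s (some (-4)) (some (s.length : Int))
  if p = "Ling".toList then String.ofList (PySem.List.slice s (some 0) (some (-4)))
  else String.ofList s

-- ===== PORT B =====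
-- nz = [i for i, c in enumerate(num) if c != "0"]; then a fold over nz with state
-- (parts, prev) that inserts "Ling" exactly for a gap (prev + 1 < i) before a nonzero digit.
def toRead_alt (num : String) : String :=
  let cs := num.toList
  let nz := ((PySem.List.enumerate cs).filter (fun p => p.2 != '0')).map Prod.fst
  let res := nz.foldl
    (fun (st : List (List Char) × Int) i =>
      let parts := if st.2 + 1 < i then st.1 ++ ["Ling".toList] else st.1
      (parts ++ [PySem.Dict.getD pvM (PySem.List.pyGetD cs i ' ') [] ++ PySem.List.pyGetD pvUnit i []], i))
    ([], -1)
  String.ofList res.1.flatten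

-- ===== PRECONDITION & SPEC =====
-- Pre_ excludes exactly the inputs where A raises: a non-digit character (KeyError in m[...])
-- or a non-'0' digit at an index >= 4 (IndexError in unit[idx]).
def Pre_toRead (num : String) : Prop :=
  ∀ i, (h : i < num.toList.length) →
    (num.toList[i].isDigit = true ∧ (4 ≤ i → num.toList[i] = '0'))

instance (num : String) : Decidable (Pre_toRead num) := by unfold Pre_toRead; infer_instance

def pvWitness_toRead : String := "4003"

def Spec_toRead (num : String) (out : String) : Prop := out = toRead_alt num
instance (num : String) (out : String) : Decidable (Spec_toRead num out) := by unfold Spec_toRead; infer_instance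

-- ===== CLAIM (what is proved, stated in full; the proofs are below) =====
def Claim_equal_toRead : Prop := ∀ (num : String), Dom_toRead num → Pre_toRead num → Spec_toRead num (toRead num)

-- ===== LEMMAS AND PROOFS =====

-- a token is nonempty and, unless it is "Ling", does not end in 'g'
def GoodTok (t : List Char) : Prop := t ≠ [] ∧ (t = "Ling".toList ∨ t.getLast? ≠ some 'g')

-- the token A produces at index k
def tokOf (cs : List Char) (k : Nat) : List Char :=
  if cs.getD k ' ' = '0' then "Ling".toList
  else PySem.Dict.getD pvM (cs.getD k ' ') [] ++ pvUnit.getD k []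

-- A's loop step, over a Nat index, and the run-collapsed token list it builds
def stepB (out : List (List Char)) (t : List Char) : List (List Char) :=
  if t = "Ling".toList ∧ out ≠ [] ∧ PySem.List.pyGetD out (-1) [] = "Ling".toList
  then out else out ++ [t]

def stepA (cs : List Char) (s : List Char) (k : Nat) : List Char :=
  let c := cs.getD k ' '
  if c = '0' ∧ PySem.List.slice s (some (-4)) (some (s.length : Int)) = "Ling".toList then s
  else if c = '0' then s ++ "Ling".toList
  else s ++ (PySem.Dict.getD pvM c [] ++ pvUnit.getD k [])

def outN (cs : List Char) (n : Nat) : List (List Char) :=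
  ((List.range n).map (tokOf cs)).foldl stepB []

-- B's step and state, over a Nat index (prev stays an Int)
def stepP (cs : List Char) (st : List (List Char) × Int) (k : Nat) : List (List Char) × Int :=
  let parts := if st.2 + 1 < (k : Int) then st.1 ++ ["Ling".toList] else st.1
  (parts ++ [PySem.Dict.getD pvM (cs.getD k ' ') [] ++ pvUnit.getD k []], (k : Int))

def partsPrev (cs : List Char) (n : Nat) : List (List Char) × Int :=
  ((List.range n).filter (fun k => cs.getD k ' ' != '0')).foldl (stepP cs) ([], -1)

-- s[-4:len(s)] is the last (at most) four characters
lemma suffix4_eq (s : List Char) :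
    PySem.List.slice s (some (-4)) (some (s.length : Int)) = s.drop (s.length - 4) := by
  simp [PySem.List.slice, PySem.List.clampIdx]
  split_ifs with h h2 h3
  · exact absurd h (by omega)
  · exact absurd h (by omega)
  · have : s.length - 4 = 0 := by omega
    simp [this]
  · have h4 : ((s.length : Int) + -4).toNat = s.length - 4 := by omega
    rw [h4, List.take_of_length_le (by simp)]

lemma digit_cases (c : Char) (h : c.isDigit = true) :
    c = '0' ∨ c ∈ ['1','2','3','4','5','6','7','8','9'] := by
  simp [Char.isDigit] at h
  obtain ⟨h1, h2⟩ := h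
  have hlo : 48 ≤ c.val.toNat := by exact_mod_cast h1
  have hhi : c.val.toNat ≤ 57 := by exact_mod_cast h2
  simp only [List.mem_cons, List.not_mem_nil, or_false, Char.ext_iff, ← UInt32.toNat_inj]
  simp only [show ('0').val.toNat = 48 from rfl, show ('1').val.toNat = 49 from rfl,
    show ('2').val.toNat = 50 from rfl, show ('3').val.toNat = 51 from rfl,
    show ('4').val.toNat = 52 from rfl, show ('5').val.toNat = 53 from rfl,
    show ('6').val.toNat = 54 from rfl, show ('7').val.toNat = 55 from rfl,
    show ('8').val.toNat = 56 from rfl, show ('9').val.toNat = 57 from rfl]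
  omega

-- the joined output ends in the 4 characters "Ling" iff the last token is "Ling"
lemma suffix_iff (out : List (List Char)) (h : ∀ t ∈ out, GoodTok t) :
    (out.flatten.drop (out.flatten.length - 4) = "Ling".toList) ↔
      out.getLast? = some "Ling".toList := by
  rcases List.eq_nil_or_concat out with rfl | ⟨ys, t, rfl⟩
  · simp
  · rw [List.concat_eq_append] at h ⊢
    have hgl : (ys ++ [t]).getLast? = some t := List.getLast?_concat
    rw [hgl]
    have hfl : (ys ++ [t]).flatten = ys.flatten ++ t := by simp
    rw [hfl]
    obtain ⟨hne, hor⟩ := h t (by simp)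
    by_cases hL : t = "Ling".toList
    · subst hL
      constructor
      · intro _; rfl
      · intro _
        have hh : (ys.flatten ++ "Ling".toList).length - 4 = ys.flatten.length := by
          simp [List.length_append]
        rw [hh, List.drop_left]
    · simp only [hL, Option.some.injEq, iff_false]
      intro heq
      have h1 : ((ys.flatten ++ t).drop ((ys.flatten ++ t).length - 4)).getLast? = some 'g' := by
        rw [heq]; rfl
      have h2 : (ys.flatten ++ t).getLast? = some 'g' := by
        conv_lhs => rw [← List.take_append_drop ((ys.flatten ++ t).length - 4) (ys.flatten ++ t)]
        rw [List.getLast?_append, h1, Option.or]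
      obtain ⟨x, hx⟩ := Option.isSome_iff_exists.mp (List.getLast?_isSome.mpr hne)
      have h3 : (ys.flatten ++ t).getLast? = t.getLast? := by
        rw [List.getLast?_append, hx, Option.or]
      rcases hor with hor | hor
      · exact hL hor
      · exact hor (by rw [← h3, h2])

lemma enum_eq (cs : List Char) :
    ∀ s : Nat, PySem.List.enumerate cs ((s : Nat) : Int) =
      (List.range cs.length).map (fun k => (((s + k : Nat) : Int), cs.getD k ' ')) := by
  induction cs with
  | nil => intro s; simp [PySem.List.enumerate]
  | cons c cs ih =>
      intro s
      rw [PySem.List.enumerate_cons]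
      have h1 : ((s : Int) + 1) = ((s + 1 : Nat) : Int) := by push_cast; ring
      rw [h1, ih (s + 1)]
      simp [List.range_succ_eq_map, List.map_map, Function.comp]
      intro a _
      ring

-- Under Pre_, tokens are Good, and a token is "Ling" exactly for the digit '0'
lemma tok_good (cs : List Char)
    (hPre : ∀ i, (h : i < cs.length) → (cs[i].isDigit = true ∧ (4 ≤ i → cs[i] = '0')))
    (n : Nat) (hn : n < cs.length) :
    GoodTok (tokOf cs n) ∧ (tokOf cs n = "Ling".toList ↔ cs.getD n ' ' = '0') := by
  have hget : cs.getD n ' ' = cs[n] := List.getD_eq_getElem cs ' ' hn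
  obtain ⟨hdig, hz⟩ := hPre n hn
  rcases digit_cases _ hdig with h0 | hmem
  · have htok : tokOf cs n = "Ling".toList := by unfold tokOf; rw [hget, h0]; simp
    rw [htok]
    exact ⟨⟨by decide, Or.inl rfl⟩, by rw [hget, h0]; simp⟩
  · have hmem' : cs[n] = '1' ∨ cs[n] = '2' ∨ cs[n] = '3' ∨ cs[n] = '4' ∨
        cs[n] = '5' ∨ cs[n] = '6' ∨ cs[n] = '7' ∨ cs[n] = '8' ∨ cs[n] = '9' := by
      simpa using hmem
    have hne0 : cs[n] ≠ '0' := by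
      rcases hmem' with h|h|h|h|h|h|h|h|h <;> rw [h] <;> decide
    have hn4 : n < 4 := by
      by_contra hge
      exact hne0 (hz (by omega))
    unfold tokOf GoodTok
    interval_cases n <;>
      (rcases hmem' with h|h|h|h|h|h|h|h|h <;> rw [hget, h] <;> decide)

-- B's "out nonempty with last element Ling" test, restated through getLast?
lemma last_cond (out : List (List Char)) :
    (out ≠ [] ∧ PySem.List.pyGetD out (-1) [] = "Ling".toList) ↔
      out.getLast? = some "Ling".toList := by
  constructor
  · rintro ⟨hne, hl⟩
    rw [PySem.List.pyGetD_neg_one _ _ hne] at hl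
    rw [List.getLast?_eq_some_getLast hne, hl]
  · intro hl
    have hne : out ≠ [] := by rintro rfl; simp at hl
    refine ⟨hne, ?_⟩
    rw [PySem.List.pyGetD_neg_one _ _ hne]
    rw [List.getLast?_eq_some_getLast hne] at hl
    exact Option.some_inj.mp hl

-- invariant (A side): A's string is the join of the run-collapsed token list
lemma main_loop (cs : List Char)
    (hPre : ∀ i, (h : i < cs.length) → (cs[i].isDigit = true ∧ (4 ≤ i → cs[i] = '0'))) :
    ∀ n, n ≤ cs.length →
      ((List.range n).foldl (stepA cs) [] = (outN cs n).flatten ∧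
        ∀ t ∈ outN cs n, GoodTok t) := by
  intro n
  induction n with
  | zero => intro _; simp [outN]
  | succ n ih =>
      intro hle
      have hn : n < cs.length := by omega
      obtain ⟨hs, hg⟩ := ih (by omega)
      obtain ⟨hgood, hiff⟩ := tok_good cs hPre n hn
      have houtN : outN cs (n + 1) = stepB (outN cs n) (tokOf cs n) := by
        simp [outN, List.range_succ]
      have hfold : (List.range (n + 1)).foldl (stepA cs) [] =
          stepA cs ((List.range n).foldl (stepA cs) []) n := by
        rw [List.range_succ, List.foldl_append]; rfl
      rw [hfold, hs, houtN]
      set out := outN cs n with hout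
      by_cases hc : cs.getD n ' ' = '0' ∧ out.getLast? = some "Ling".toList
      · have hA : stepA cs out.flatten n = out.flatten := by
          unfold stepA
          rw [suffix4_eq, if_pos ⟨hc.1, (suffix_iff out hg).mpr hc.2⟩]
        have hB : stepB out (tokOf cs n) = out := by
          unfold stepB
          rw [if_pos ⟨hiff.mpr hc.1, (last_cond out).mpr hc.2⟩]
        rw [hA, hB]
        exact ⟨rfl, hg⟩
      · have hB : stepB out (tokOf cs n) = out ++ [tokOf cs n] := by
          unfold stepB
          rw [if_neg]
          intro ⟨h1, h2⟩
          exact hc ⟨hiff.mp h1, (last_cond out).mp h2⟩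
        have hA : stepA cs out.flatten n = out.flatten ++ tokOf cs n := by
          unfold stepA
          rw [suffix4_eq]
          by_cases h0 : cs.getD n ' ' = '0'
          · rw [if_neg, if_pos h0]
            · unfold tokOf; rw [if_pos h0]
            · intro ⟨_, h2⟩
              exact hc ⟨h0, (suffix_iff out hg).mp h2⟩
          · rw [if_neg, if_neg h0]
            · unfold tokOf; rw [if_neg h0]
            · intro ⟨h1, _⟩; exact h0 h1
        rw [hA, hB]
        constructor
        · simp
        · intro t ht
          rcases List.mem_append.mp ht with ht | ht
          · exact hg t ht
          · rw [List.mem_singleton.mp ht]; exact hgood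

lemma partsPrev_succ (cs : List Char) (n : Nat) :
    partsPrev cs (n + 1) =
      if cs.getD n ' ' = '0' then partsPrev cs n else stepP cs (partsPrev cs n) n := by
  unfold partsPrev
  rw [List.range_succ, List.filter_append, List.foldl_append]
  have hfn : List.filter (fun k => cs.getD k ' ' != '0') [n] =
      if cs.getD n ' ' = '0' then [] else [n] := by
    by_cases h : cs.getD n ' ' = '0'
    · have hb : (cs.getD n ' ' != '0') = false := by rw [h]; rfl
      rw [if_pos h, List.filter_singleton, hb]
      rfl
    · have hb : (cs.getD n ' ' != '0') = true := by simpa using h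
      rw [if_neg h, List.filter_singleton, hb]
      rfl
  rw [hfn]
  by_cases h : cs.getD n ' ' = '0'
  · rw [if_pos h, if_pos h]; rfl
  · rw [if_neg h, if_neg h]; rfl

-- invariant (B side): the collapsed token list is B's parts plus a pending trailing "Ling"
lemma parts_inv (cs : List Char)
    (hPre : ∀ i, (h : i < cs.length) → (cs[i].isDigit = true ∧ (4 ≤ i → cs[i] = '0'))) :
    ∀ n, n ≤ cs.length →
      (outN cs n = (partsPrev cs n).1 ++
          (if (partsPrev cs n).2 + 1 < (n : Int) then ["Ling".toList] else []) ∧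
        (partsPrev cs n).2 < (n : Int) ∧ -1 ≤ (partsPrev cs n).2 ∧
        (partsPrev cs n).1.getLast? ≠ some "Ling".toList) := by
  intro n
  induction n with
  | zero =>
      intro _
      refine ⟨?_, by norm_num [partsPrev], by norm_num [partsPrev], by simp [partsPrev]⟩
      simp [outN, partsPrev]
  | succ n ih =>
      intro hle
      have hn : n < cs.length := by omega
      obtain ⟨hout, hlt, hge, hlast⟩ := ih (by omega)
      obtain ⟨hgood, hiff⟩ := tok_good cs hPre n hn
      have houtN : outN cs (n + 1) = stepB (outN cs n) (tokOf cs n) := by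
        simp [outN, List.range_succ]
      rw [houtN, partsPrev_succ]
      by_cases h0 : cs.getD n ' ' = '0'
      · rw [if_pos h0]
        have htok : tokOf cs n = "Ling".toList := hiff.mpr h0
        by_cases hpend : (partsPrev cs n).2 + 1 < (n : Int)
        · -- pending "Ling" already present: A's collapse skips, B unchanged
          have heq : outN cs n = (partsPrev cs n).1 ++ ["Ling".toList] := by
            rw [hout, if_pos hpend]
          have hB : stepB (outN cs n) (tokOf cs n) = outN cs n := by
            unfold stepB
            rw [if_pos ⟨htok, (last_cond _).mpr (by rw [heq]; exact List.getLast?_concat)⟩]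
          rw [hB, heq, if_pos (by push_cast at hpend ⊢; omega)]
          exact ⟨rfl, by push_cast; omega, hge, hlast⟩
        · -- first zero of a run: A appends a "Ling", which becomes B's pending one
          have heq : outN cs n = (partsPrev cs n).1 := by
            rw [hout, if_neg hpend, List.append_nil]
          have hB : stepB (outN cs n) (tokOf cs n) = outN cs n ++ [tokOf cs n] := by
            unfold stepB
            rw [if_neg]
            intro ⟨_, h2⟩
            rw [heq] at h2
            exact hlast ((last_cond _).mp h2)
          rw [hB, heq, htok, if_pos (by push_cast; omega)]
          exact ⟨rfl, by push_cast; omega, hge, hlast⟩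
      · rw [if_neg h0]
        have htokne : tokOf cs n ≠ "Ling".toList := fun h => h0 (hiff.mp h)
        have htok : tokOf cs n =
            PySem.Dict.getD pvM (cs.getD n ' ') [] ++ pvUnit.getD n [] := by
          unfold tokOf; rw [if_neg h0]
        have hB : stepB (outN cs n) (tokOf cs n) = outN cs n ++ [tokOf cs n] := by
          unfold stepB
          rw [if_neg]
          intro ⟨h1, _⟩
          exact htokne h1
        rw [hB, hout]
        unfold stepP
        simp only [← htok]
        refine ⟨?_, by push_cast; omega, by omega, ?_⟩
        · rw [if_neg (show ¬((n : Int) + 1 < ((n + 1 : Nat) : Int)) by push_cast; omega),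
            List.append_nil]
          split_ifs <;> simp
        · rw [List.getLast?_concat]
          intro h
          exact htokne (Option.some_inj.mp h)

-- B's port computes (partsPrev cs cs.length).1
lemma alt_eq_parts (num : String) :
    toRead_alt num = String.ofList (partsPrev num.toList num.toList.length).1.flatten := by
  unfold toRead_alt
  simp only []
  set cs := num.toList with hcs
  have h0 : (0 : Int) = ((0 : Nat) : Int) := rfl
  rw [h0, enum_eq cs 0]
  have hfm : ((List.range cs.length).map
        (fun k => (((0 + k : Nat) : Int), cs.getD k ' '))).filter (fun p => p.2 != '0') =
      ((List.range cs.length).filter (fun k => cs.getD k ' ' != '0')).map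
        (fun k => (((0 + k : Nat) : Int), cs.getD k ' ')) := by
    rw [List.filter_map]; rfl
  rw [hfm, List.map_map, List.foldl_map]
  have hstep : ((List.range cs.length).filter (fun k => cs.getD k ' ' != '0')).foldl
      (fun (st : List (List Char) × Int) k =>
        let i := (Prod.fst ∘ fun k => (((0 + k : Nat) : Int), cs.getD k ' ')) k
        let parts := if st.2 + 1 < i then st.1 ++ ["Ling".toList] else st.1
        (parts ++ [PySem.Dict.getD pvM (PySem.List.pyGetD cs i ' ') [] ++
            PySem.List.pyGetD pvUnit i []], i)) ([], -1) =
      ((List.range cs.length).filter (fun k => cs.getD k ' ' != '0')).foldl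
        (stepP cs) ([], -1) := by
    apply PySem.List.foldl_congr_mem
    intro st k _
    simp only [Function.comp, Nat.zero_add, stepP, PySem.List.pyGetD_natCast]
  rw [hstep]
  rfl

lemma toRead_eq_alt (num : String)
    (hPre : ∀ i, (h : i < num.toList.length) →
      (num.toList[i].isDigit = true ∧ (4 ≤ i → num.toList[i] = '0'))) :
    toRead num = toRead_alt num := by
  rw [alt_eq_parts]
  unfold toRead
  simp only []
  set cs := num.toList with hcs
  obtain ⟨hs, hg⟩ := main_loop cs hPre cs.length (le_refl _)
  obtain ⟨hout, hlt, hge, hlast⟩ := parts_inv cs hPre cs.length (le_refl _)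
  have hAfold : (PySem.List.pyRange 0 (cs.length : Int) 1).foldl
      (fun s idx =>
        let c := PySem.List.pyGetD cs idx ' '
        if c = '0' ∧ PySem.List.slice s (some (-4)) (some (s.length : Int)) = "Ling".toList then s
        else if c = '0' then s ++ "Ling".toList
        else s ++ (PySem.Dict.getD pvM c [] ++ PySem.List.pyGetD pvUnit idx [])) [] =
      (List.range cs.length).foldl (stepA cs) [] := by
    rw [PySem.List.pyRange_zero_nat, List.foldl_map]
    congr 1
    funext s k
    simp only [stepA, PySem.List.pyGetD_natCast]
  rw [hAfold, hs]
  obtain ⟨hout, hlt, hge, hlast⟩ := parts_inv cs hPre cs.length (le_refl _)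
  rw [suffix4_eq]
  by_cases hpend : (partsPrev cs cs.length).2 + 1 < (cs.length : Int)
  · -- pending trailing "Ling": A's final slice trims exactly it
    have heq : outN cs cs.length = (partsPrev cs cs.length).1 ++ ["Ling".toList] := by
      rw [hout, if_pos hpend]
    have hL : (outN cs cs.length).getLast? = some "Ling".toList := by
      rw [heq]; exact List.getLast?_concat
    rw [if_pos ((suffix_iff _ hg).mpr hL)]
    congr 1
    rw [PySem.List.slice_zero_start, PySem.List.slice_to_neg_ofNat _ 4 (by omega), heq]
    have hfl : ((partsPrev cs cs.length).1 ++ ["Ling".toList]).flatten =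
        (partsPrev cs cs.length).1.flatten ++ "Ling".toList := by simp
    rw [hfl]
    apply List.take_left'
    simp [List.length_append]
  · -- no pending "Ling": nothing to trim on either side
    have heq : outN cs cs.length = (partsPrev cs cs.length).1 := by
      rw [hout, if_neg hpend, List.append_nil]
    rw [if_neg]
    · rw [heq]
    · intro h
      apply hlast
      rw [← heq]
      exact (suffix_iff _ hg).mp h

-- ===== VERDICT (by name: the statement is the Claim_ definition above) =====
theorem toRead_spec : Claim_equal_toRead := by
  intro num _ hPre
  unfold Pre_toRead at hPre
  unfold Spec_toRead
  exact toRead_eq_alt num hPre
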